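-- pv_equiv track=rewrite | github.com/dinosaur-oatmeal/Queens-Game | nqueens.py | is_region_connected
-- ===== SOURCE A (Python) =====
-- def is_region_connected(region_board: list[list[int]], region_id: int, cell_to_remove: tuple[int, int]) -> bool:
--     n = len(region_board)
--
--     # Get all cells in the region except the one being removed
--     cells = [(i, j)
--              for i in range(n)
--              for j in range(n)
--              if region_board[i][j] == region_id and (i, j) != cell_to_remove
--             ]
--
--     # No cells left, so region is not connected
--     if not cells:
--         return False
--
--     # Set of cells visited and stack of cells to visit
--     visited = set()
--     # Start from a remaining cell
--     stack = [cells[0]]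
--
--     # DFS traversal to all cells in list
--     while stack:
--         row, col = stack.pop()
--
--         # Skip visited cells
--         if (row, col) in visited:
--             continue
--
--         # Add new cells to set
--         visited.add((row, col))
--
--         # Check 4 connected neighbors (up, down, left, right)
--         for d_row, d_col in [(-1, 0), (1, 0), (0, -1), (0, 1)]:
--             neighbor_row = row + d_row
--             neighbor_col = col + d_col
--
--             # Ensure neighbor cell inside board
--             if (0 <= neighbor_row < n) and (0 <= neighbor_col < n):
--                 neighbor = (neighbor_row, neighbor_col)
--
--                 # Add to stack if part of same region and not removed cell
--                 if (region_board[neighbor_row][neighbor_col] == region_id and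
--                     neighbor != cell_to_remove and
--                     neighbor not in visited):
--                         stack.append(neighbor)
--
--     # Region connected if we visited every cell
--     return len(visited) == len(cells)
-- ===== SOURCE B (Python) =====
-- def is_region_connected(region_board: list[list[int]], region_id: int, cell_to_remove: tuple[int, int]) -> bool:
--     n = len(region_board)
--
--     # Region cells minus the removed one, in row-major order
--     cells = [(i, j)
--              for i in range(n)
--              for j in range(n)
--              if region_board[i][j] == region_id and (i, j) != cell_to_remove
--             ]
--     cell_set = set(cells)
--
--     # Disjoint-set forest by eager relabelling: label[c] is the representative
--     # of c's component; a union rewrites one whole class label to the other.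
--     label = {c: c for c in cells}
--     for c in cells:
--         for nb in ((c[0], c[1] + 1), (c[0] + 1, c[1])):
--             if nb in cell_set:
--                 la, lb = label[c], label[nb]
--                 if la != lb:
--                     label = {k: (lb if v == la else v) for k, v in label.items()}
--
--     # Connected iff exactly one component (empty region gives 0 roots -> False)
--     return len(set(label.values())) == 1
-- ===== Notes on version B (the rewrite author's own statement) =====
-- stated objective: alternative
-- what changed: Replaces the explicit-stack DFS flood fill with a visited set by a disjoint-set (union-find) pass: every remaining region cell gets a component label, each cell is unioned with its in-region right and down neighbours by eager relabelling, and the region is connected iff exactly one distinct root label remains (the empty region yields zero roots, hence False).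
import Mathlib
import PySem

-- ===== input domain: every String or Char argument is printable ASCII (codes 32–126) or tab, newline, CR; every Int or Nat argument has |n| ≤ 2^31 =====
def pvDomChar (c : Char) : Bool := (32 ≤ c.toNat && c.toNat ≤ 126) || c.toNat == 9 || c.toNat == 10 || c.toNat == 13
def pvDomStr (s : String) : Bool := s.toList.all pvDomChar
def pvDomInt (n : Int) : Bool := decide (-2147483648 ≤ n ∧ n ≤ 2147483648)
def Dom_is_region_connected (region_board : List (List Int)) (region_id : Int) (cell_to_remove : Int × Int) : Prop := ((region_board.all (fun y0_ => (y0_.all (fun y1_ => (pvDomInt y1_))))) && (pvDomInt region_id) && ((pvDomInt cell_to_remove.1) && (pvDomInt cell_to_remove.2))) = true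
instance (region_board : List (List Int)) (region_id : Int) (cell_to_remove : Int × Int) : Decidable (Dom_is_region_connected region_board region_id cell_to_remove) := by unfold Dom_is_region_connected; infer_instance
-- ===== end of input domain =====

-- B replaces A's explicit-stack DFS flood fill by a disjoint-set (union-find) pass:
-- it labels every remaining region cell with a component representative, unions each
-- cell with its in-region right and down neighbours, and tests for a single root.
-- Objective: alternative (a genuinely different algorithm of similar cost).

-- ===== PORT A =====

-- region_board[i][j] as an Option (none exactly where Python raises IndexError)
def pvAt (rb : List (List Int)) (i j : Int) : Option Int :=
  (PySem.List.pyGet? rb i).bind (fun row => PySem.List.pyGet? row j)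

-- the comprehension [(i,j) for i in range(n) for j in range(n) if rb[i][j]==rid and (i,j)!=rem]
def pvCells (rb : List (List Int)) (rid : Int) (rem : Int × Int) : List (Int × Int) :=
  (PySem.List.pyRange 0 (PySem.List.len rb) 1).flatMap (fun i =>
    ((PySem.List.pyRange 0 (PySem.List.len rb) 1).filter
      (fun j => pvAt rb i j == some rid && (i, j) != rem)).map (fun j => (i, j)))

-- eligibility of a cell: in the n×n grid, carries region_id, and is not the removed cell
def pvQ (rb : List (List Int)) (rid : Int) (rem : Int × Int) (c : Int × Int) : Bool :=
  decide (0 ≤ c.1 ∧ c.1 < PySem.List.len rb ∧ 0 ≤ c.2 ∧ c.2 < PySem.List.len rb) &&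
    (pvAt rb c.1 c.2 == some rid) && (c != rem)

lemma mem_pvCells (rb : List (List Int)) (rid : Int) (rem : Int × Int) (c : Int × Int) :
    c ∈ pvCells rb rid rem ↔ pvQ rb rid rem c = true := by
  simp only [pvCells, pvQ, List.mem_flatMap, List.mem_map, List.mem_filter,
    PySem.List.mem_pyRange_one, Bool.and_eq_true, decide_eq_true_eq]
  constructor
  · rintro ⟨i, ⟨hi0, hin⟩, j, ⟨⟨hj0, hjn⟩, h5, h6⟩, rfl⟩
    exact ⟨⟨⟨hi0, hin, hj0, hjn⟩, h5⟩, h6⟩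
  · rintro ⟨⟨⟨h1, h2, h3, h4⟩, h5⟩, h6⟩
    exact ⟨c.1, ⟨h1, h2⟩, c.2, ⟨⟨h3, h4⟩, h5, h6⟩, rfl⟩

def pvDirsA : List (Int × Int) := [(-1, 0), (1, 0), (0, -1), (0, 1)]

-- the inner for-loop of A: the neighbours pushed onto the stack, in push order
def pvPushes (rb : List (List Int)) (rid : Int) (rem : Int × Int)
    (visited : List (Int × Int)) (c : Int × Int) : List (Int × Int) :=
  pvDirsA.filterMap (fun d =>
    if 0 ≤ c.1 + d.1 ∧ c.1 + d.1 < PySem.List.len rb ∧ 0 ≤ c.2 + d.2 ∧ c.2 + d.2 < PySem.List.len rb then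
      if pvAt rb (c.1 + d.1) (c.2 + d.2) == some rid ∧ (c.1 + d.1, c.2 + d.2) ≠ rem ∧
          (c.1 + d.1, c.2 + d.2) ∉ visited then
        some (c.1 + d.1, c.2 + d.2)
      else none
    else none)

-- a grid step in one of the four directions of A's loop
def pvAdj (c x : Int × Int) : Prop := ∃ d ∈ pvDirsA, x = (c.1 + d.1, c.2 + d.2)

lemma mem_pvPushes (rb : List (List Int)) (rid : Int) (rem : Int × Int)
    (visited : List (Int × Int)) (c x : Int × Int) :
    x ∈ pvPushes rb rid rem visited c ↔
      pvQ rb rid rem x = true ∧ x ∉ visited ∧ pvAdj c x := by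
  simp only [pvPushes, List.mem_filterMap]
  constructor
  · rintro ⟨d, hd, hsome⟩
    split_ifs at hsome with h1 h2
    · rcases Option.some.inj hsome with rfl
      refine ⟨?_, h2.2.2, ⟨d, hd, rfl⟩⟩
      simp only [pvQ, Bool.and_eq_true, decide_eq_true_eq]
      exact ⟨⟨h1, beq_iff_eq.mpr (beq_iff_eq.mp h2.1)⟩, bne_iff_ne.mpr h2.2.1⟩
  · rintro ⟨hq, hnv, d, hd, rfl⟩
    refine ⟨d, hd, ?_⟩
    simp only [pvQ, Bool.and_eq_true, decide_eq_true_eq] at hq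
    rw [if_pos hq.1.1, if_pos ⟨hq.1.2, bne_iff_ne.mp hq.2, hnv⟩]

def pvGrid (n : Int) : Finset (Int × Int) :=
  ((PySem.List.pyRange 0 n 1).flatMap (fun i =>
    (PySem.List.pyRange 0 n 1).map (fun j => (i, j)))).toFinset

lemma mem_pvGrid_of_pvQ (rb : List (List Int)) (rid : Int) (rem : Int × Int) (c : Int × Int)
    (h : pvQ rb rid rem c = true) : c ∈ pvGrid (PySem.List.len rb) := by
  simp only [pvQ, Bool.and_eq_true, decide_eq_true_eq] at h
  obtain ⟨⟨⟨h1, h2, h3, h4⟩, _⟩, _⟩ := h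
  simp only [pvGrid, List.mem_toFinset, List.mem_flatMap, List.mem_map,
    PySem.List.mem_pyRange_one]
  exact ⟨c.1, ⟨h1, h2⟩, c.2, ⟨h3, h4⟩, rfl⟩

-- A's DFS loop; the Python stack's top is the list head here (Python pushes/pops at the
-- list's end, so one for-loop's appends arrive reversed at the head); the proof argument
-- h only justifies termination and does not alter what is computed.
def pvDFS (rb : List (List Int)) (rid : Int) (rem : Int × Int)
    (visited stack : List (Int × Int))
    (h : ∀ c ∈ stack, pvQ rb rid rem c = true) : List (Int × Int) :=
  match stack with
  | [] => visited
  | c :: rest =>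
    if hv : visited.contains c then
      pvDFS rb rid rem visited rest (fun x hx => h x (List.mem_cons_of_mem c hx))
    else
      pvDFS rb rid rem (visited ++ [c])
        ((pvPushes rb rid rem (visited ++ [c]) c).reverse ++ rest)
        (fun x hx => by
          rcases List.mem_append.mp hx with hx | hx
          · exact ((mem_pvPushes rb rid rem (visited ++ [c]) c x).mp
              (List.mem_reverse.mp hx)).1
          · exact h x (List.mem_cons_of_mem c hx))
  termination_by 5 * ((pvGrid (PySem.List.len rb)) \ visited.toFinset).card + stack.length
  decreasing_by
  · simp only [List.length_cons]; omega
  · have hc : c ∈ pvGrid (PySem.List.len rb) :=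
      mem_pvGrid_of_pvQ rb rid rem c (h c List.mem_cons_self)
    have hcv : c ∉ visited.toFinset := by
      simp only [List.mem_toFinset]
      intro hmem
      exact hv (List.contains_iff_mem.mpr hmem)
    have hmem1 : c ∈ (pvGrid (PySem.List.len rb)) \ visited.toFinset :=
      Finset.mem_sdiff.mpr ⟨hc, hcv⟩
    have hmem2 : c ∉ (pvGrid (PySem.List.len rb)) \ (visited ++ [c]).toFinset := by
      simp [Finset.mem_sdiff]
    have hsubset : (pvGrid (PySem.List.len rb)) \ (visited ++ [c]).toFinset ⊆
        (pvGrid (PySem.List.len rb)) \ visited.toFinset := by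
      intro y hy
      simp only [Finset.mem_sdiff, List.toFinset_append, List.toFinset_cons,
        List.toFinset_nil, Finset.mem_union, Finset.mem_insert, Finset.notMem_empty] at hy ⊢
      tauto
    have hcard : ((pvGrid (PySem.List.len rb)) \ (visited ++ [c]).toFinset).card <
        ((pvGrid (PySem.List.len rb)) \ visited.toFinset).card :=
      Finset.card_lt_card (Finset.ssubset_def.mpr
        ⟨hsubset, fun habs => hmem2 (habs hmem1)⟩)
    have hlen : (pvPushes rb rid rem (visited ++ [c]) c).length ≤ 4 := by
      have := List.length_filterMap_le (fun d =>
        if 0 ≤ c.1 + d.1 ∧ c.1 + d.1 < PySem.List.len rb ∧ 0 ≤ c.2 + d.2 ∧ c.2 + d.2 < PySem.List.len rb then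
          if pvAt rb (c.1 + d.1) (c.2 + d.2) == some rid ∧ (c.1 + d.1, c.2 + d.2) ≠ rem ∧
              (c.1 + d.1, c.2 + d.2) ∉ (visited ++ [c]) then
            some (c.1 + d.1, c.2 + d.2)
          else none
        else none) pvDirsA
      simpa [pvPushes, pvDirsA] using this
    simp only [List.length_append, List.length_reverse, List.length_cons]
    omega

-- port of A: DFS from the first remaining cell, then compare visit count with cell count
def is_region_connected (region_board : List (List Int)) (region_id : Int)
    (cell_to_remove : Int × Int) : Bool :=
  if hne : pvCells region_board region_id cell_to_remove = [] then false
  else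
    (pvDFS region_board region_id cell_to_remove []
        [(pvCells region_board region_id cell_to_remove).head hne]
        (fun c hc => by
          rw [List.mem_singleton] at hc
          subst hc
          exact (mem_pvCells region_board region_id cell_to_remove _).mp
            (List.head_mem hne))).length ==
      (pvCells region_board region_id cell_to_remove).length

-- ===== PORT B =====

-- the label dict, as the association list the type convention prescribes
abbrev PvLab := List ((Int × Int) × (Int × Int))

-- label[k]; total form: the keys always cover every queried cell, so the default is never read
def pvLabGet (lab : PvLab) (k : Int × Int) : Int × Int :=
  match lab.find? (fun kv => kv.1 == k) with
  | some kv => kv.2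
  | none => k

-- one candidate neighbour nb of c: if nb is in the region, union c's and nb's classes by
-- rewriting every label equal to label[c] to label[nb] (the dict comprehension in B)
def pvUnionNb (cellset : PySem.Set (Int × Int)) (lab : PvLab) (c nb : Int × Int) : PvLab :=
  if PySem.Set.contains cellset nb then
    if pvLabGet lab c ≠ pvLabGet lab nb then
      lab.map (fun kv => (kv.1, if kv.2 == pvLabGet lab c then pvLabGet lab nb else kv.2))
    else lab
  else lab

-- B's inner loop: union c with its right and down neighbours
def pvUnionStep (cellset : PySem.Set (Int × Int)) (lab : PvLab) (c : Int × Int) : PvLab :=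
  [(c.1, c.2 + 1), (c.1 + 1, c.2)].foldl (fun lab nb => pvUnionNb cellset lab c nb) lab

-- port of B: disjoint-set by eager relabelling, connected iff exactly one root
def is_region_connected_alt (region_board : List (List Int)) (region_id : Int)
    (cell_to_remove : Int × Int) : Bool :=
  let cells := pvCells region_board region_id cell_to_remove
  let cellset : PySem.Set (Int × Int) := PySem.Set.ofList cells
  let label0 : PvLab := cells.map (fun c => (c, c))
  let label := cells.foldl (pvUnionStep cellset) label0
  PySem.Set.len (PySem.Set.ofList (label.map (fun kv => kv.2))) == 1

-- ===== PRECONDITION & SPEC =====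

-- Pre_ excludes exactly the boards with a row shorter than the number of rows, on
-- which Python A raises IndexError (it reads rb[i][j] for all j in range(len(rb))).
def Pre_is_region_connected (region_board : List (List Int)) (region_id : Int)
    (cell_to_remove : Int × Int) : Prop :=
  ∀ row ∈ region_board, region_board.length ≤ row.length
instance (region_board : List (List Int)) (region_id : Int) (cell_to_remove : Int × Int) :
    Decidable (Pre_is_region_connected region_board region_id cell_to_remove) := by
  unfold Pre_is_region_connected; infer_instance

def pvWitness_is_region_connected : List (List Int) × Int × (Int × Int) :=
  ([[1, 1], [1, 0]], 1, (1, 1))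

def Spec_is_region_connected (region_board : List (List Int)) (region_id : Int) (cell_to_remove : Int × Int) (out : Bool) : Prop := out = is_region_connected_alt region_board region_id cell_to_remove
instance (region_board : List (List Int)) (region_id : Int) (cell_to_remove : Int × Int) (out : Bool) : Decidable (Spec_is_region_connected region_board region_id cell_to_remove out) := by unfold Spec_is_region_connected; infer_instance

-- ===== CLAIM (what is proved, stated in full; the proofs are below) =====
def Claim_equal_is_region_connected : Prop := ∀ (region_board : List (List Int)) (region_id : Int) (cell_to_remove : Int × Int), Dom_is_region_connected region_board region_id cell_to_remove → Pre_is_region_connected region_board region_id cell_to_remove → Spec_is_region_connected region_board region_id cell_to_remove (is_region_connected region_board region_id cell_to_remove)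

-- ===== LEMMAS AND PROOFS =====

-- the undirected step relation of A's flood fill: two eligible, adjacent cells
def pvStep (rb : List (List Int)) (rid : Int) (rem : Int × Int) (a b : Int × Int) : Prop :=
  pvQ rb rid rem a = true ∧ pvQ rb rid rem b = true ∧ pvAdj a b

-- a step whose target avoids the visited list
def pvStepOut (rb : List (List Int)) (rid : Int) (rem : Int × Int)
    (V : List (Int × Int)) (a b : Int × Int) : Prop :=
  pvStep rb rid rem a b ∧ b ∉ V

-- the right/down edge relation B unions over
def pvRd (cells : List (Int × Int)) (a b : Int × Int) : Prop :=
  a ∈ cells ∧ b ∈ cells ∧ (b = (a.1, a.2 + 1) ∨ b = (a.1 + 1, a.2))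

lemma pvAdj_iff (c x : Int × Int) :
    pvAdj c x ↔ (x.1 = c.1 - 1 ∧ x.2 = c.2) ∨ (x.1 = c.1 + 1 ∧ x.2 = c.2) ∨
      (x.1 = c.1 ∧ x.2 = c.2 - 1) ∨ (x.1 = c.1 ∧ x.2 = c.2 + 1) := by
  unfold pvAdj
  constructor
  · rintro ⟨d, hd, rfl⟩
    simp only [pvDirsA, List.mem_cons, List.not_mem_nil, or_false] at hd
    rcases hd with rfl | rfl | rfl | rfl <;> simp <;> omega
  · intro h
    simp only [pvDirsA, List.mem_cons, List.not_mem_nil, or_false]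
    rcases h with ⟨h1, h2⟩ | ⟨h1, h2⟩ | ⟨h1, h2⟩ | ⟨h1, h2⟩
    · exact ⟨(-1, 0), Or.inl rfl, by apply Prod.ext <;> simp <;> omega⟩
    · exact ⟨(1, 0), Or.inr (Or.inl rfl), by apply Prod.ext <;> simp <;> omega⟩
    · exact ⟨(0, -1), Or.inr (Or.inr (Or.inl rfl)), by apply Prod.ext <;> simp <;> omega⟩
    · exact ⟨(0, 1), Or.inr (Or.inr (Or.inr rfl)), by apply Prod.ext <;> simp <;> omega⟩

lemma pvAdj_symm (a b : Int × Int) : pvAdj a b → pvAdj b a := by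
  rw [pvAdj_iff, pvAdj_iff]
  omega

lemma pvStep_symm (rb : List (List Int)) (rid : Int) (rem : Int × Int) :
    Symmetric (pvStep rb rid rem) := by
  rintro a b ⟨ha, hb, hadj⟩
  exact ⟨hb, ha, pvAdj_symm a b hadj⟩

lemma pvStepOut_mono (rb : List (List Int)) (rid : Int) (rem : Int × Int)
    (V W : List (Int × Int)) (hVW : ∀ x ∈ V, x ∈ W) (a b : Int × Int) :
    pvStepOut rb rid rem W a b → pvStepOut rb rid rem V a b := by
  rintro ⟨hs, hb⟩
  exact ⟨hs, fun hbV => hb (hVW b hbV)⟩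

lemma nodup_pvCells (rb : List (List Int)) (rid : Int) (rem : Int × Int) :
    (pvCells rb rid rem).Nodup := by
  unfold pvCells
  rw [List.nodup_flatMap]
  constructor
  · intro i _
    apply List.Nodup.map
    · intro a b hab
      simpa using congrArg Prod.snd hab
    · exact (PySem.List.nodup_pyRange_one 0 (PySem.List.len rb)).filter _
  · apply List.Pairwise.imp ?_ (PySem.List.pairwise_lt_pyRange_one 0 (PySem.List.len rb))
    intro a b hab x hxa hxb
    simp only [List.mem_map, List.mem_filter] at hxa hxb
    obtain ⟨j1, _, rfl⟩ := hxa
    obtain ⟨j2, _, h2⟩ := hxb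
    have := congrArg Prod.fst h2
    simp at this
    omega

-- KEY GRAPH LEMMA: adding a fresh cell c to the avoid set splits a path into
-- "still avoids c" or "enters c and continues from one of c's eligible neighbours"
lemma pvReach_avoid_insert (rb : List (List Int)) (rid : Int) (rem : Int × Int)
    (V : List (Int × Int)) (c : Int × Int) (s x : Int × Int)
    (hreach : Relation.ReflTransGen (pvStepOut rb rid rem V) s x) :
    Relation.ReflTransGen (pvStepOut rb rid rem (V ++ [c])) s x ∨ x = c ∨
      ∃ p, pvStep rb rid rem c p ∧ p ∉ (V ++ [c]) ∧
        Relation.ReflTransGen (pvStepOut rb rid rem (V ++ [c])) p x := by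
  induction hreach using Relation.ReflTransGen.head_induction_on with
  | refl =>
    by_cases hxc : x = c
    · exact Or.inr (Or.inl hxc)
    · exact Or.inl Relation.ReflTransGen.refl
  | @head a t hst hrest ih =>
    rcases ih with hin | hxc | ⟨p, hp1, hp2, hp3⟩
    · by_cases htc : t = c
      · subst htc
        rcases Relation.ReflTransGen.cases_head hin with heq | ⟨p, hp, hrest'⟩
        · exact Or.inr (Or.inl heq.symm)
        · exact Or.inr (Or.inr ⟨p, hp.1, hp.2, hrest'⟩)
      · refine Or.inl (Relation.ReflTransGen.head ⟨hst.1, ?_⟩ hin)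
        intro hmem
        rcases List.mem_append.mp hmem with hmem | hmem
        · exact hst.2 hmem
        · exact htc (List.mem_singleton.mp hmem)
    · exact Or.inr (Or.inl hxc)
    · exact Or.inr (Or.inr ⟨p, hp1, hp2, hp3⟩)

-- reachability from c avoiding V, decomposed at the first step
lemma pvReach_from_head (rb : List (List Int)) (rid : Int) (rem : Int × Int)
    (V : List (Int × Int)) (c x : Int × Int) :
    Relation.ReflTransGen (pvStepOut rb rid rem V) c x ↔
      x = c ∨ ∃ p, pvStep rb rid rem c p ∧ p ∉ (V ++ [c]) ∧
        Relation.ReflTransGen (pvStepOut rb rid rem (V ++ [c])) p x := by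
  constructor
  · intro h
    rcases Relation.ReflTransGen.cases_head h with heq | ⟨p, hp, hrest⟩
    · exact Or.inl heq.symm
    · rcases pvReach_avoid_insert rb rid rem V c p x hrest with h' | rfl | ⟨p', hp1, hp2, hp3⟩
      · by_cases hpc : p = c
        · subst hpc
          rcases Relation.ReflTransGen.cases_head h' with heq | ⟨p'', hp'', hrest''⟩
          · exact Or.inl heq.symm
          · exact Or.inr ⟨p'', hp''.1, hp''.2, hrest''⟩
        · refine Or.inr ⟨p, hp.1, ?_, h'⟩
          intro hmem
          rcases List.mem_append.mp hmem with hmem | hmem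
          · exact hp.2 hmem
          · exact hpc (List.mem_singleton.mp hmem)
      · exact Or.inl rfl
      · exact Or.inr ⟨p', hp1, hp2, hp3⟩
  · rintro (rfl | ⟨p, hp1, hp2, hp3⟩)
    · exact Relation.ReflTransGen.refl
    · refine Relation.ReflTransGen.head ⟨hp1, fun hmem => hp2 (List.mem_append_left _ hmem)⟩ ?_
      exact Relation.ReflTransGen.mono
        (fun a b => pvStepOut_mono rb rid rem V (V ++ [c])
          (fun y hy => List.mem_append_left _ hy) a b) hp3

-- DFS characterisation: the returned list holds the old visited cells plus every cell
-- reachable from some stack cell by a path avoiding the visited list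
lemma mem_pvDFS (rb : List (List Int)) (rid : Int) (rem : Int × Int) :
    ∀ (V S : List (Int × Int)) (h : ∀ c ∈ S, pvQ rb rid rem c = true) (x : Int × Int),
      x ∈ pvDFS rb rid rem V S h ↔
        x ∈ V ∨ ∃ s ∈ S, s ∉ V ∧ Relation.ReflTransGen (pvStepOut rb rid rem V) s x := by
  intro V S h x
  induction V, S, h using pvDFS.induct rb rid rem with
  | case1 V h _ =>
    rw [pvDFS]
    simp
  | case2 V c rest h hv _ ih =>
    rw [pvDFS, dif_pos hv, ih]
    have hcv : c ∈ V := List.contains_iff_mem.mp hv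
    constructor
    · rintro (hx | ⟨s, hs, hsnv, hreach⟩)
      · exact Or.inl hx
      · exact Or.inr ⟨s, List.mem_cons_of_mem c hs, hsnv, hreach⟩
    · rintro (hx | ⟨s, hs, hsnv, hreach⟩)
      · exact Or.inl hx
      · rcases List.mem_cons.mp hs with rfl | hs
        · exact absurd hcv hsnv
        · exact Or.inr ⟨s, hs, hsnv, hreach⟩
  | case3 V c rest h hv _ ih =>
    rw [pvDFS, dif_neg hv, ih]
    have hcnv : c ∉ V := fun hmem => hv (List.contains_iff_mem.mpr hmem)
    have hqc : pvQ rb rid rem c = true := h c List.mem_cons_self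
    have hmono : ∀ {a b : Int × Int},
        Relation.ReflTransGen (pvStepOut rb rid rem (V ++ [c])) a b →
          Relation.ReflTransGen (pvStepOut rb rid rem V) a b :=
      fun hr => Relation.ReflTransGen.mono
        (fun a b => pvStepOut_mono rb rid rem V (V ++ [c])
          (fun y hy => List.mem_append_left _ hy) a b) hr
    constructor
    · rintro (hx | ⟨s, hs, hsnv, hreach⟩)
      · rcases List.mem_append.mp hx with hx | hx
        · exact Or.inl hx
        · rw [List.mem_singleton] at hx
          subst hx
          exact Or.inr ⟨x, List.mem_cons_self, hcnv, Relation.ReflTransGen.refl⟩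
      · rcases List.mem_append.mp hs with hs | hs
        · have hsP := (mem_pvPushes rb rid rem (V ++ [c]) c s).mp (List.mem_reverse.mp hs)
          have hedge : pvStepOut rb rid rem V c s :=
            ⟨⟨hqc, hsP.1, hsP.2.2⟩, fun hmem => hsP.2.1 (List.mem_append_left _ hmem)⟩
          exact Or.inr ⟨c, List.mem_cons_self, hcnv,
            Relation.ReflTransGen.head hedge (hmono hreach)⟩
        · exact Or.inr ⟨s, List.mem_cons_of_mem c hs,
            fun hmem => hsnv (List.mem_append_left _ hmem), hmono hreach⟩
    · rintro (hx | ⟨s, hs, hsnv, hreach⟩)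
      · exact Or.inl (List.mem_append_left _ hx)
      · rcases List.mem_cons.mp hs with rfl | hs
        · rcases (pvReach_from_head rb rid rem V s x).mp hreach with rfl | ⟨p, hp1, hp2, hp3⟩
          · exact Or.inl (List.mem_append_right _ (List.mem_singleton.mpr rfl))
          · refine Or.inr ⟨p, List.mem_append_left _ (List.mem_reverse.mpr
              ((mem_pvPushes rb rid rem (V ++ [s]) s p).mpr ⟨hp1.2.1, hp2, hp1.2.2⟩)), hp2, hp3⟩
        · rcases pvReach_avoid_insert rb rid rem V c s x hreach with h' | rfl | ⟨p, hp1, hp2, hp3⟩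
          · by_cases hsc : s = c
            · subst hsc
              rcases Relation.ReflTransGen.cases_head h' with heq | ⟨p, hp, hrest'⟩
              · exact Or.inl (List.mem_append_right _ (List.mem_singleton.mpr heq.symm))
              · refine Or.inr ⟨p, List.mem_append_left _ (List.mem_reverse.mpr
                  ((mem_pvPushes rb rid rem (V ++ [s]) s p).mpr
                    ⟨hp.1.2.1, hp.2, hp.1.2.2⟩)), hp.2, hrest'⟩
            · refine Or.inr ⟨s, List.mem_append_right _ hs, ?_, h'⟩
              intro hmem
              rcases List.mem_append.mp hmem with hmem | hmem
              · exact hsnv hmem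
              · exact hsc (List.mem_singleton.mp hmem)
          · exact Or.inl (List.mem_append_right _ (List.mem_singleton.mpr rfl))
          · exact Or.inr ⟨p, List.mem_append_left _ (List.mem_reverse.mpr
              ((mem_pvPushes rb rid rem (V ++ [c]) c p).mpr ⟨hp1.2.1, hp2, hp1.2.2⟩)),
              hp2, hp3⟩

lemma nodup_pvDFS (rb : List (List Int)) (rid : Int) (rem : Int × Int) :
    ∀ (V S : List (Int × Int)) (h : ∀ c ∈ S, pvQ rb rid rem c = true),
      V.Nodup → (pvDFS rb rid rem V S h).Nodup := by
  intro V S h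
  induction V, S, h using pvDFS.induct rb rid rem with
  | case1 V h _ =>
    intro hnd
    rw [pvDFS]
    exact hnd
  | case2 V c rest h hv _ ih =>
    intro hnd
    rw [pvDFS, dif_pos hv]
    exact ih hnd
  | case3 V c rest h hv _ ih =>
    intro hnd
    rw [pvDFS, dif_neg hv]
    apply ih
    have hcnv : c ∉ V := fun hmem => hv (List.contains_iff_mem.mpr hmem)
    simp only [List.nodup_append, hnd, List.nodup_cons, List.not_mem_nil,
      not_false_iff, List.nodup_nil, and_true, true_and]
    intro a ha y hy
    rw [List.mem_singleton] at hy
    subst hy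
    intro heq
    exact hcnv (heq ▸ ha)

-- the DFS visits exactly the cells reachable from the start cell
lemma mem_pvDFS_start (rb : List (List Int)) (rid : Int) (rem : Int × Int) (c0 : Int × Int)
    (pf : ∀ c ∈ [c0], pvQ rb rid rem c = true) (x : Int × Int) :
    x ∈ pvDFS rb rid rem [] [c0] pf ↔ Relation.ReflTransGen (pvStep rb rid rem) c0 x := by
  rw [mem_pvDFS]
  simp only [List.not_mem_nil, false_or, List.mem_singleton, exists_eq_left,
    not_false_iff, true_and]
  constructor
  · exact fun h => Relation.ReflTransGen.mono (fun a b hab => hab.1) h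
  · exact fun h => Relation.ReflTransGen.mono
      (fun a b hab => ⟨hab, List.not_mem_nil⟩) h

-- the visit count equals the cell count iff every cell is reachable from the start
lemma pvDFS_count (rb : List (List Int)) (rid : Int) (rem : Int × Int)
    (hne : pvCells rb rid rem ≠ [])
    (pf : ∀ c ∈ [(pvCells rb rid rem).head hne], pvQ rb rid rem c = true) :
    (pvDFS rb rid rem [] [(pvCells rb rid rem).head hne] pf).length =
        (pvCells rb rid rem).length ↔
      ∀ x ∈ pvCells rb rid rem,
        Relation.ReflTransGen (pvStep rb rid rem) ((pvCells rb rid rem).head hne) x := by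
  have hmemD := mem_pvDFS_start rb rid rem ((pvCells rb rid rem).head hne) pf
  have hndD : (pvDFS rb rid rem [] [(pvCells rb rid rem).head hne] pf).Nodup :=
    nodup_pvDFS rb rid rem [] [(pvCells rb rid rem).head hne] pf List.nodup_nil
  have hsubD : ∀ x ∈ pvDFS rb rid rem [] [(pvCells rb rid rem).head hne] pf,
      x ∈ pvCells rb rid rem := by
    intro x hx
    rcases Relation.ReflTransGen.cases_tail ((hmemD x).mp hx) with heq | ⟨y, _, hstep⟩
    · exact heq ▸ List.head_mem hne
    · exact (mem_pvCells rb rid rem x).mpr hstep.2.1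
  constructor
  · intro hlen x hx
    have hperm : (pvDFS rb rid rem [] [(pvCells rb rid rem).head hne] pf).Perm
        (pvCells rb rid rem) :=
      List.Subperm.perm_of_length_le (List.subperm_of_subset hndD hsubD) (le_of_eq hlen.symm)
    exact (hmemD x).mp (hperm.mem_iff.mpr hx)
  · intro hall
    refine List.Perm.length_eq ?_
    refine (List.perm_ext_iff_of_nodup hndD (nodup_pvCells rb rid rem)).mpr ?_
    exact fun x => ⟨hsubD x, fun hx => (hmemD x).mpr (hall x hx)⟩

-- A returns true iff every remaining cell is reachable from the first one
lemma is_region_connected_true_iff (rb : List (List Int)) (rid : Int) (rem : Int × Int)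
    (hne : pvCells rb rid rem ≠ []) :
    is_region_connected rb rid rem = true ↔
      ∀ x ∈ pvCells rb rid rem,
        Relation.ReflTransGen (pvStep rb rid rem) ((pvCells rb rid rem).head hne) x := by
  unfold is_region_connected
  rw [dif_neg hne, beq_iff_eq]
  exact pvDFS_count rb rid rem hne _

-- ----- B side -----

lemma eqvGen_bot {α : Type} (x y : α) :
    Relation.EqvGen (fun _ _ => False) x y ↔ x = y := by
  constructor
  · intro h
    induction h with
    | rel _ _ h => exact absurd h (fun h => h)
    | refl _ => rfl
    | symm _ _ _ ih => exact ih.symm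
    | trans _ _ _ _ _ ih1 ih2 => exact ih1.trans ih2
  · rintro rfl
    exact Relation.EqvGen.refl x

lemma eqvGen_congr {α : Type} (R S : α → α → Prop) (h : ∀ a b, R a b ↔ S a b)
    (x y : α) : Relation.EqvGen R x y ↔ Relation.EqvGen S x y := by
  constructor
  · exact Relation.EqvGen.mono (fun a b hab => (h a b).mp hab)
  · exact Relation.EqvGen.mono (fun a b hab => (h a b).mpr hab)

-- adding one edge (c,nb) to a relation, described by where paths use it
lemma eqvGen_union_single {α : Type} (R : α → α → Prop) (c nb x y : α) :
    Relation.EqvGen (fun a b => R a b ∨ (a = c ∧ b = nb)) x y ↔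
      Relation.EqvGen R x y ∨
        (Relation.EqvGen R x c ∧ Relation.EqvGen R nb y) ∨
        (Relation.EqvGen R x nb ∧ Relation.EqvGen R c y) := by
  constructor
  · intro h
    induction h with
    | rel a b hab =>
      rcases hab with hab | ⟨rfl, rfl⟩
      · exact Or.inl (Relation.EqvGen.rel a b hab)
      · exact Or.inr (Or.inl ⟨Relation.EqvGen.refl a, Relation.EqvGen.refl b⟩)
    | refl a => exact Or.inl (Relation.EqvGen.refl a)
    | symm a b _ ih =>
      rcases ih with h1 | ⟨h1, h2⟩ | ⟨h1, h2⟩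
      · exact Or.inl (h1.symm _ _)
      · exact Or.inr (Or.inr ⟨h2.symm _ _, h1.symm _ _⟩)
      · exact Or.inr (Or.inl ⟨h2.symm _ _, h1.symm _ _⟩)
    | trans a b z _ _ ih1 ih2 =>
      rcases ih1 with h1 | ⟨h1a, h1b⟩ | ⟨h1a, h1b⟩ <;>
        rcases ih2 with h2 | ⟨h2a, h2b⟩ | ⟨h2a, h2b⟩
      · exact Or.inl (h1.trans _ _ _ h2)
      · exact Or.inr (Or.inl ⟨h1.trans _ _ _ h2a, h2b⟩)
      · exact Or.inr (Or.inr ⟨h1.trans _ _ _ h2a, h2b⟩)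
      · exact Or.inr (Or.inl ⟨h1a, h1b.trans _ _ _ h2⟩)
      · exact Or.inl ((h1a.trans _ _ _ ((h1b.trans _ _ _ h2a).symm _ _)).trans _ _ _ h2b)
      · exact Or.inl (h1a.trans _ _ _ h2b)
      · exact Or.inr (Or.inr ⟨h1a, h1b.trans _ _ _ h2⟩)
      · exact Or.inl (h1a.trans _ _ _ h2b)
      · exact Or.inl ((h1a.trans _ _ _ ((h1b.trans _ _ _ h2a).symm _ _)).trans _ _ _ h2b)
  · have hmono : ∀ {u v : α}, Relation.EqvGen R u v →
        Relation.EqvGen (fun a b => R a b ∨ (a = c ∧ b = nb)) u v :=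
      fun h => Relation.EqvGen.mono (fun a b hab => Or.inl hab) h
    have hedge : Relation.EqvGen (fun a b => R a b ∨ (a = c ∧ b = nb)) c nb :=
      Relation.EqvGen.rel c nb (Or.inr ⟨rfl, rfl⟩)
    rintro (h | ⟨h1, h2⟩ | ⟨h1, h2⟩)
    · exact hmono h
    · exact ((hmono h1).trans _ _ _ hedge).trans _ _ _ (hmono h2)
    · exact ((hmono h1).trans _ _ _ (hedge.symm _ _)).trans _ _ _ (hmono h2)

-- the invariant of B's union pass: keys are exactly the cells, and two cells share a
-- label exactly when the processed edges connect them
def pvGood (cells : List (Int × Int)) (lab : PvLab) (R : (Int × Int) → (Int × Int) → Prop) : Prop :=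
  lab.map (fun kv => kv.1) = cells ∧
    ∀ x ∈ cells, ∀ y ∈ cells,
      (pvLabGet lab x = pvLabGet lab y ↔ Relation.EqvGen R x y)

lemma pvFind_beq_of_mem {x : Int × Int} {l : List (Int × Int)} (hx : x ∈ l) :
    l.find? (fun c => c == x) = some x := by
  induction l with
  | nil => exact absurd hx List.not_mem_nil
  | cons a t ih =>
    by_cases hax : a = x
    · subst hax
      exact List.find?_cons_of_pos (by simp)
    · rw [List.find?_cons_of_neg (by simpa using hax)]
      exact ih (List.mem_of_ne_of_mem (fun h => hax h.symm) hx)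

lemma pvLabGet_init (cells : List (Int × Int)) (x : Int × Int) (hx : x ∈ cells) :
    pvLabGet (cells.map (fun c => (c, c))) x = x := by
  unfold pvLabGet
  rw [List.find?_map]
  have : ((fun kv : (Int × Int) × (Int × Int) => kv.1 == x) ∘ fun c => (c, c)) =
      fun c => c == x := rfl
  rw [this, pvFind_beq_of_mem hx]
  rfl

-- looking a present key up through a value-rewriting dict comprehension
lemma pvLabGet_map_val (lab : PvLab) (g : Int × Int → Int × Int) (k : Int × Int)
    (hk : k ∈ lab.map (fun kv => kv.1)) :
    pvLabGet (lab.map (fun kv => (kv.1, g kv.2))) k = g (pvLabGet lab k) := by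
  unfold pvLabGet
  rw [List.find?_map]
  have hcomp : ((fun kv : (Int × Int) × (Int × Int) => kv.1 == k) ∘
      fun kv : (Int × Int) × (Int × Int) => (kv.1, g kv.2)) =
      fun kv : (Int × Int) × (Int × Int) => kv.1 == k := rfl
  rw [hcomp]
  cases hfind : lab.find? (fun kv => kv.1 == k) with
  | none =>
    rcases List.mem_map.mp hk with ⟨kv, hkv, rfl⟩
    exact absurd (by simp : (fun kv : (Int × Int) × (Int × Int) => kv.1 == kv.1) kv = true)
      (by simpa using List.find?_eq_none.mp hfind kv hkv)
  | some kv => rfl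

-- with keys exactly `cells` (no duplicates), the values list is the lookups of the keys
lemma pvMap_snd_eq_map_pvLabGet (lab : PvLab) :
    ∀ (cells : List (Int × Int)), lab.map (fun kv => kv.1) = cells → cells.Nodup →
      lab.map (fun kv => kv.2) = cells.map (pvLabGet lab) := by
  induction lab with
  | nil =>
    rintro cells rfl _
    rfl
  | cons kv t ih =>
    rintro cells rfl hnd
    simp only [List.map_cons, List.nodup_cons] at hnd ⊢
    refine List.cons_eq_cons.mpr ⟨?_, ?_⟩
    · unfold pvLabGet
      rw [List.find?_cons_of_pos (by simp)]
    · rw [ih (t.map (fun kv => kv.1)) rfl hnd.2]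
      apply List.map_congr_left
      intro x hx
      unfold pvLabGet
      rw [List.find?_cons_of_neg]
      simp only [beq_iff_eq]
      intro heq
      exact hnd.1 (heq ▸ hx)

lemma pvGood_init (cells : List (Int × Int)) (hnd : cells.Nodup) :
    pvGood cells (cells.map (fun c => (c, c))) (fun _ _ => False) := by
  constructor
  · rw [List.map_map]
    exact List.map_id cells
  · intro x hx y hy
    rw [pvLabGet_init cells x hx, pvLabGet_init cells y hy, eqvGen_bot]

lemma pvGood_unionNb (cells : List (Int × Int))
    (lab : PvLab) (R : (Int × Int) → (Int × Int) → Prop)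
    (c nb : Int × Int) (hc : c ∈ cells) (hgood : pvGood cells lab R) :
    pvGood cells (pvUnionNb (PySem.Set.ofList cells) lab c nb)
      (fun a b => R a b ∨ (a = c ∧ b = nb ∧ nb ∈ cells)) := by
  obtain ⟨hkeys, hinv⟩ := hgood
  unfold pvUnionNb
  by_cases hnb : nb ∈ cells
  · rw [if_pos ((PySem.Set.contains_iff _ _).mpr ((PySem.Set.mem_ofList cells nb).mpr hnb))]
    have hcongr : ∀ x y : Int × Int,
        Relation.EqvGen (fun a b => R a b ∨ (a = c ∧ b = nb ∧ nb ∈ cells)) x y ↔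
          Relation.EqvGen (fun a b => R a b ∨ (a = c ∧ b = nb)) x y :=
      fun x y => eqvGen_congr _ _ (fun a b => by tauto) x y
    by_cases heq : pvLabGet lab c = pvLabGet lab nb
    · rw [if_neg (fun hC => hC heq)]
      refine ⟨hkeys, fun x hx y hy => ?_⟩
      rw [hinv x hx y hy, hcongr, eqvGen_union_single]
      have hcnb : Relation.EqvGen R c nb := (hinv c hc nb hnb).mp heq
      constructor
      · exact Or.inl
      · rintro (h | ⟨h1, h2⟩ | ⟨h1, h2⟩)
        · exact h
        · exact (h1.trans _ _ _ hcnb).trans _ _ _ h2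
        · exact (h1.trans _ _ _ (hcnb.symm _ _)).trans _ _ _ h2
    · rw [if_pos heq]
      constructor
      · rw [List.map_map]
        exact hkeys
      · intro x hx y hy
        have hxkeys : x ∈ lab.map (fun kv => kv.1) := hkeys ▸ hx
        have hykeys : y ∈ lab.map (fun kv => kv.1) := hkeys ▸ hy
        rw [pvLabGet_map_val lab
          (fun v => if v == pvLabGet lab c then pvLabGet lab nb else v) x hxkeys]
        rw [pvLabGet_map_val lab
          (fun v => if v == pvLabGet lab c then pvLabGet lab nb else v) y hykeys]
        rw [hcongr, eqvGen_union_single]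
        have hxla := hinv x hx c hc
        have hyla := hinv y hy c hc
        have hxnb := hinv x hx nb hnb
        have hynb := hinv y hy nb hnb
        simp only [beq_iff_eq]
        by_cases h1 : pvLabGet lab x = pvLabGet lab c <;>
          by_cases h2 : pvLabGet lab y = pvLabGet lab c
        · rw [if_pos h1, if_pos h2]
          refine iff_of_true rfl ?_
          exact Or.inl ((hxla.mp h1).trans _ _ _ ((hyla.mp h2).symm _ _))
        · rw [if_pos h1, if_neg h2]
          constructor
          · intro hL
            exact Or.inr (Or.inl ⟨hxla.mp h1, ((hynb.mp hL.symm).symm _ _)⟩)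
          · rintro (h | ⟨ha, hb⟩ | ⟨ha, hb⟩)
            · exact absurd (hyla.mpr ((h.symm _ _).trans _ _ _ (hxla.mp h1))) h2
            · exact (hynb.mpr (hb.symm _ _)).symm
            · exact absurd (hyla.mpr (hb.symm _ _)) h2
        · rw [if_neg h1, if_pos h2]
          constructor
          · intro hL
            exact Or.inr (Or.inr ⟨hxnb.mp hL, ((hyla.mp h2).symm _ _)⟩)
          · rintro (h | ⟨ha, hb⟩ | ⟨ha, hb⟩)
            · exact absurd (hxla.mpr (h.trans _ _ _ (hyla.mp h2))) h1
            · exact absurd (hxla.mpr ha) h1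
            · exact hxnb.mpr ha
        · rw [if_neg h1, if_neg h2]
          have hxy := hinv x hx y hy
          constructor
          · exact fun hL => Or.inl (hxy.mp hL)
          · rintro (h | ⟨ha, hb⟩ | ⟨ha, hb⟩)
            · exact hxy.mpr h
            · exact absurd (hxla.mpr ha) h1
            · exact absurd (hyla.mpr (hb.symm _ _)) h2
  · rw [if_neg (fun hC => hnb ((PySem.Set.mem_ofList cells nb).mp
      ((PySem.Set.contains_iff _ _).mp hC)))]
    refine ⟨hkeys, fun x hx y hy => (hinv x hx y hy).trans
      (eqvGen_congr _ _ (fun a b =>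
        ⟨Or.inl, fun h => h.elim id (fun h' => absurd h'.2.2 hnb)⟩) x y)⟩

lemma pvGood_fold (cells : List (Int × Int)) :
    ∀ (cs : List (Int × Int)) (lab : PvLab) (R : (Int × Int) → (Int × Int) → Prop),
      (∀ c ∈ cs, c ∈ cells) → pvGood cells lab R →
      pvGood cells (cs.foldl (pvUnionStep (PySem.Set.ofList cells)) lab)
        (fun a b => R a b ∨ (a ∈ cs ∧ b ∈ cells ∧ (b = (a.1, a.2 + 1) ∨ b = (a.1 + 1, a.2)))) := by
  intro cs
  induction cs with
  | nil =>
    intro lab R hcs hgood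
    simp only [List.foldl_nil]
    exact ⟨hgood.1, fun x hx y hy => (hgood.2 x hx y hy).trans
      (eqvGen_congr _ _ (fun a b => by simp) x y)⟩
  | cons c cs' ih =>
    intro lab R hcs hgood
    simp only [List.foldl_cons]
    have hc : c ∈ cells := hcs c List.mem_cons_self
    have h1 := pvGood_unionNb cells lab R c (c.1, c.2 + 1) hc hgood
    have h2 := pvGood_unionNb cells _ _ c (c.1 + 1, c.2) hc h1
    have hstep : pvUnionStep (PySem.Set.ofList cells) lab c =
        pvUnionNb (PySem.Set.ofList cells)
          (pvUnionNb (PySem.Set.ofList cells) lab c (c.1, c.2 + 1)) c (c.1 + 1, c.2) := rfl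
    rw [hstep]
    have h3 := ih _ _ (fun a ha => hcs a (List.mem_cons_of_mem c ha)) h2
    refine ⟨h3.1, fun x hx y hy => (h3.2 x hx y hy).trans (eqvGen_congr _ _ ?_ x y)⟩
    intro a b
    constructor
    · rintro (((h | ⟨rfl, rfl, hm⟩) | ⟨rfl, rfl, hm⟩) | ⟨hmem, hbm, hsh⟩)
      · exact Or.inl h
      · exact Or.inr ⟨List.mem_cons_self, hm, Or.inl rfl⟩
      · exact Or.inr ⟨List.mem_cons_self, hm, Or.inr rfl⟩
      · exact Or.inr ⟨List.mem_cons_of_mem c hmem, hbm, hsh⟩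
    · rintro (h | ⟨hmem, hbm, hsh⟩)
      · exact Or.inl (Or.inl (Or.inl h))
      · rcases List.mem_cons.mp hmem with rfl | hmem
        · rcases hsh with rfl | rfl
          · exact Or.inl (Or.inl (Or.inr ⟨rfl, rfl, hbm⟩))
          · exact Or.inl (Or.inr ⟨rfl, rfl, hbm⟩)
        · exact Or.inr ⟨hmem, hbm, hsh⟩

-- a one-element set of labels means every cell's label equals the first cell's label
lemma pvSetLen_map_one (f : Int × Int → Int × Int) (c0 : Int × Int) (tl : List (Int × Int)) :
    (PySem.Set.ofList ((c0 :: tl).map f)).length = 1 ↔ ∀ x ∈ c0 :: tl, f x = f c0 := by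
  rw [List.map_cons, PySem.Set.ofList_cons]
  have hlen : ∀ s : List (Int × Int), (f c0 :: s).length = 1 ↔ s = [] := fun s => by
    simp [List.length_eq_zero_iff]
  rw [hlen, List.eq_nil_iff_forall_not_mem]
  constructor
  · intro h x hx
    by_cases hfx : f x = f c0
    · exact hfx
    · rcases List.mem_cons.mp hx with rfl | hx'
      · exact absurd rfl hfx
      · exact absurd ((PySem.Set.mem_discard _ _ _).mpr
          ⟨(PySem.Set.mem_ofList _ _).mpr (List.mem_map_of_mem hx'), hfx⟩) (h _)
  · intro h y hy
    rw [PySem.Set.mem_discard] at hy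
    obtain ⟨hy1, hy2⟩ := hy
    rw [PySem.Set.mem_ofList] at hy1
    rcases List.mem_map.mp hy1 with ⟨x, hx, rfl⟩
    exact hy2 (h x (List.mem_cons_of_mem _ hx))

-- B returns true iff the right/down edges connect every remaining cell to the first one
lemma is_region_connected_alt_true_iff (rb : List (List Int)) (rid : Int) (rem : Int × Int)
    (hne : pvCells rb rid rem ≠ []) :
    is_region_connected_alt rb rid rem = true ↔
      ∀ x ∈ pvCells rb rid rem,
        Relation.EqvGen (pvRd (pvCells rb rid rem)) x ((pvCells rb rid rem).head hne) := by
  obtain ⟨c0, tl, hcons⟩ : ∃ c0 tl, pvCells rb rid rem = c0 :: tl := by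
    cases h : pvCells rb rid rem with
    | nil => exact absurd h hne
    | cons a t => exact ⟨a, t, rfl⟩
  have hgood := pvGood_fold (pvCells rb rid rem) (pvCells rb rid rem)
    ((pvCells rb rid rem).map (fun c => (c, c))) (fun _ _ => False)
    (fun a ha => ha) (pvGood_init (pvCells rb rid rem) (nodup_pvCells rb rid rem))
  have hRiff : ∀ x y : Int × Int,
      Relation.EqvGen (fun a b => False ∨ (a ∈ pvCells rb rid rem ∧ b ∈ pvCells rb rid rem ∧
        (b = (a.1, a.2 + 1) ∨ b = (a.1 + 1, a.2)))) x y ↔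
        Relation.EqvGen (pvRd (pvCells rb rid rem)) x y :=
    fun x y => eqvGen_congr _ _ (fun a b => by simp [pvRd]) x y
  have hvals := pvMap_snd_eq_map_pvLabGet
    ((pvCells rb rid rem).foldl (pvUnionStep (PySem.Set.ofList (pvCells rb rid rem)))
      ((pvCells rb rid rem).map (fun c => (c, c))))
    (pvCells rb rid rem) hgood.1 (nodup_pvCells rb rid rem)
  unfold is_region_connected_alt
  simp only [PySem.Set.len, beq_iff_eq, Nat.cast_eq_one]
  rw [hvals]
  have hhead : (pvCells rb rid rem).head hne = c0 := by simp [hcons]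
  rw [hhead]
  rw [hcons, pvSetLen_map_one, ← hcons]
  have hc0 : c0 ∈ pvCells rb rid rem := hcons ▸ List.mem_cons_self
  constructor
  · intro h x hx
    exact (hRiff x c0).mp ((hgood.2 x hx c0 hc0).mp (h x hx))
  · intro h x hx
    exact (hgood.2 x hx c0 hc0).mpr ((hRiff x c0).mpr (h x hx))

-- ----- bridge -----

lemma pvRd_le_step (rb : List (List Int)) (rid : Int) (rem : Int × Int) (a b : Int × Int)
    (h : pvRd (pvCells rb rid rem) a b) : pvStep rb rid rem a b := by
  obtain ⟨ha, hb, hsh⟩ := h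
  refine ⟨(mem_pvCells rb rid rem a).mp ha, (mem_pvCells rb rid rem b).mp hb, ?_⟩
  rw [pvAdj_iff]
  rcases hsh with rfl | rfl <;> simp

lemma step_le_eqvGen_rd (rb : List (List Int)) (rid : Int) (rem : Int × Int) (a b : Int × Int)
    (h : pvStep rb rid rem a b) : Relation.EqvGen (pvRd (pvCells rb rid rem)) a b := by
  obtain ⟨ha, hb, hadj⟩ := h
  have hamem := (mem_pvCells rb rid rem a).mpr ha
  have hbmem := (mem_pvCells rb rid rem b).mpr hb
  rcases (pvAdj_iff a b).mp hadj with ⟨h1, h2⟩ | ⟨h1, h2⟩ | ⟨h1, h2⟩ | ⟨h1, h2⟩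
  · exact (Relation.EqvGen.rel b a
      ⟨hbmem, hamem, Or.inr (by apply Prod.ext <;> simp <;> omega)⟩).symm _ _
  · exact Relation.EqvGen.rel a b
      ⟨hamem, hbmem, Or.inr (by apply Prod.ext <;> simp <;> omega)⟩
  · exact (Relation.EqvGen.rel b a
      ⟨hbmem, hamem, Or.inl (by apply Prod.ext <;> simp <;> omega)⟩).symm _ _
  · exact Relation.EqvGen.rel a b
      ⟨hamem, hbmem, Or.inl (by apply Prod.ext <;> simp <;> omega)⟩

lemma pvBridge (rb : List (List Int)) (rid : Int) (rem : Int × Int) (c0 : Int × Int)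
    (hc0 : c0 ∈ pvCells rb rid rem) (x : Int × Int) (hx : x ∈ pvCells rb rid rem) :
    Relation.ReflTransGen (pvStep rb rid rem) c0 x ↔
      Relation.EqvGen (pvRd (pvCells rb rid rem)) x c0 := by
  have hsymmR : Symmetric (Relation.ReflTransGen (pvStep rb rid rem)) :=
    Relation.ReflTransGen.symmetric (pvStep_symm rb rid rem)
  constructor
  · intro h
    have hfor : ∀ y : Int × Int, Relation.ReflTransGen (pvStep rb rid rem) c0 y →
        Relation.EqvGen (pvRd (pvCells rb rid rem)) c0 y := by
      intro y hy
      induction hy with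
      | refl => exact Relation.EqvGen.refl c0
      | @tail b c' hab hbc ih => exact ih.trans _ _ _ (step_le_eqvGen_rd rb rid rem b c' hbc)
    exact (hfor x h).symm _ _
  · intro h
    have hback : ∀ u v : Int × Int, Relation.EqvGen (pvRd (pvCells rb rid rem)) u v →
        Relation.ReflTransGen (pvStep rb rid rem) u v := by
      intro u v huv
      induction huv with
      | rel a b hab => exact Relation.ReflTransGen.single (pvRd_le_step rb rid rem a b hab)
      | refl a => exact Relation.ReflTransGen.refl
      | symm a b _ ih => exact hsymmR ih
      | trans a b z _ _ ih1 ih2 => exact ih1.trans ih2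
    exact hsymmR (hback x c0 h)

-- ===== VERDICT (by name: the statement is the Claim_ definition above) =====
theorem is_region_connected_spec : Claim_equal_is_region_connected := by
  unfold Claim_equal_is_region_connected
  intro rb rid rem _ _
  unfold Spec_is_region_connected
  by_cases hne : pvCells rb rid rem = []
  · unfold is_region_connected is_region_connected_alt
    simp [hne, PySem.Set.len]
  · have hA := is_region_connected_true_iff rb rid rem hne
    have hB := is_region_connected_alt_true_iff rb rid rem hne
    have hhead : (pvCells rb rid rem).head hne ∈ pvCells rb rid rem := List.head_mem hne
    have hiff : is_region_connected rb rid rem = true ↔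
        is_region_connected_alt rb rid rem = true := by
      rw [hA, hB]
      constructor
      · intro h x hx
        exact (pvBridge rb rid rem _ hhead x hx).mp (h x hx)
      · intro h x hx
        exact (pvBridge rb rid rem _ hhead x hx).mpr (h x hx)
    cases hA' : is_region_connected rb rid rem <;>
      cases hB' : is_region_connected_alt rb rid rem <;> simp_all
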